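-- pv_equiv track=rewrite | github.com/miczek2309/logia | taka_sama.py | taka_sama
-- ===== SOURCE A (Python) =====
-- def taka_sama(lista1):
--     reka = -100000
--     suma = 0
--     for u in range(len(lista1)):
--         poczotek = lista1[u]
--         for i in lista1:
--             if i == poczotek:
--                 suma = suma * 10 + i
--         if suma > reka:
--             reka = suma
--         suma = 0
--     return reka
-- ===== SOURCE B (Python) =====
-- def taka_sama(lista1):
--     counts = {}
--     for v in lista1:
--         counts[v] = counts.get(v, 0) + 1
--     best = -100000
--     for v, c in counts.items():
--         s = 0
--         for _ in range(c):
--             s = s * 10 + v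
--         if s > best:
--             best = s
--     return best
-- ===== Notes on version B (the rewrite author's own statement) =====
-- stated objective: faster
-- what changed: Replaced A's nested loop (for every position, rescan the whole list to rebuild the concatenated number) by a single counting pass into a dict followed by one pass over the distinct values, building each value's concatenated number once from its count.
import Mathlib
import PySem

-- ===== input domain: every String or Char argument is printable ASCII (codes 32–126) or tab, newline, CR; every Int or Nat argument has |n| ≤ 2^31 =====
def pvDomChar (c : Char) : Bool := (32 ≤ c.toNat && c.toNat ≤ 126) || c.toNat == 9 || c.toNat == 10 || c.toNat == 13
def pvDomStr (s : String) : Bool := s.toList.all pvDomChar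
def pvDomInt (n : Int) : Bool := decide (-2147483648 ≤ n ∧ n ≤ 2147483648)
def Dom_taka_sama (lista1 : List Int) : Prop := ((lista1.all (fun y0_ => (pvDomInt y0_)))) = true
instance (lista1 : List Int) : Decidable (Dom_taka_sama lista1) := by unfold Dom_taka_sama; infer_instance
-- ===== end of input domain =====

-- B replaces A's nested position×element scans by a single counting pass (dict) plus one pass
-- over the distinct values; objective: faster (one linear pass instead of a quadratic scan).

-- ===== PORT A =====
def taka_sama (lista1 : List Int) : Int :=
  (PySem.List.pyRange 0 (PySem.List.len lista1) 1).foldl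
    (fun reka u =>
      let poczotek := PySem.List.pyGetD lista1 u 0
      let suma := lista1.foldl (fun suma i => if i == poczotek then suma * 10 + i else suma) 0
      if suma > reka then suma else reka)
    (-100000)

-- ===== PORT B =====
def taka_sama_alt (lista1 : List Int) : Int :=
  let counts : PySem.Dict Int Int :=
    lista1.foldl (fun d v => d.insert v (d.getD v 0 + 1)) PySem.Dict.empty
  counts.items.foldl
    (fun best kv =>
      let s := (PySem.List.pyRange 0 kv.2 1).foldl (fun s _ => s * 10 + kv.1) 0
      if s > best then s else best)
    (-100000)

-- ===== PRECONDITION & SPEC =====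
def Spec_taka_sama (lista1 : List Int) (out : Int) : Prop := out = taka_sama_alt lista1
instance (lista1 : List Int) (out : Int) : Decidable (Spec_taka_sama lista1 out) := by unfold Spec_taka_sama; infer_instance

-- ===== CLAIM (what is proved, stated in full; the proofs are below) =====
def Claim_equal_taka_sama : Prop := ∀ (lista1 : List Int), Dom_taka_sama lista1 → Spec_taka_sama lista1 (taka_sama lista1)

-- ===== LEMMAS AND PROOFS =====

-- n applications of s ↦ s*10+v
def repIter (v : Int) : Nat → Int → Int
  | 0, s => s
  | n+1, s => repIter v n (s * 10 + v)

-- A's inner loop over a list whose elements are all p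
lemma foldl_digits_const (p : Int) (l : List Int) (h : ∀ i ∈ l, i = p) (s : Int) :
    l.foldl (fun s i => s * 10 + i) s = repIter p l.length s := by
  induction l generalizing s with
  | nil => rfl
  | cons x xs ih =>
    have hx : x = p := h x (by simp)
    simp only [List.foldl_cons, List.length_cons, repIter, hx]
    exact ih (fun i hi => h i (by simp [hi])) _

-- B's inner loop, which ignores the loop variable
lemma foldl_ignore_digits (v : Int) (l : List Int) (s : Int) :
    l.foldl (fun s _ => s * 10 + v) s = repIter v l.length s := by
  induction l generalizing s with
  | nil => rfl
  | cons x xs ih => simp only [List.foldl_cons, List.length_cons, repIter]; exact ih _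

-- a running max of a projection depends only on the SET of elements
lemma foldl_max_proj_eq (f : Int → Int) (b : Int) (l₁ l₂ : List Int)
    (h : ∀ x, x ∈ l₁ ↔ x ∈ l₂) :
    l₁.foldl (fun acc x => max acc (f x)) b = l₂.foldl (fun acc x => max acc (f x)) b := by
  have hrw : ∀ (m : List Int), m.foldl (fun acc x => max acc (f x)) b = (m.map f).foldl max b :=
    fun m => List.foldl_map.symm
  have key : ∀ (m₁ m₂ : List Int), (∀ x, x ∈ m₁ → x ∈ m₂) →
      m₁.foldl (fun acc x => max acc (f x)) b ≤ m₂.foldl (fun acc x => max acc (f x)) b := by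
    intro m₁ m₂ hm
    rw [hrw m₁, hrw m₂]
    rcases PySem.List.foldl_max_mem (m₁.map f) b with he | hmem
    · rw [he]; exact (PySem.List.le_foldl_max (m₂.map f) b).1
    · rcases List.mem_map.mp hmem with ⟨x, hx, hfx⟩
      rw [← hfx]
      exact (PySem.List.le_foldl_max (m₂.map f) b).2 _ (List.mem_map_of_mem (hm x hx))
  exact le_antisymm (key _ _ fun x => (h x).mp) (key _ _ fun x => (h x).mpr)

lemma if_gt_eq_max (r s : Int) : (if s > r then s else r) = max r s := by omega

-- ===== VERDICT (by name: the statement is the Claim_ definition above) =====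
theorem taka_sama_spec : Claim_equal_taka_sama := by
  intro lista1 _
  show taka_sama lista1 = taka_sama_alt lista1
  -- A: index loop → element loop, inner loop → repIter of the count
  have hA : taka_sama lista1 =
      lista1.foldl (fun acc v => max acc (repIter v (lista1.count v) 0)) (-100000) := by
    have h0 :=
      PySem.List.foldl_pyRange_zero_pyGetD lista1 0
        (fun (reka p : Int) =>
          let suma := lista1.foldl (fun suma i => if i == p then suma * 10 + i else suma) 0
          if suma > reka then suma else reka)
        (-100000)
    refine Eq.trans h0 ?_
    apply PySem.List.foldl_congr_mem
    intro acc v _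
    simp only [PySem.List.foldl_if_eq_foldl_filter]
    rw [foldl_digits_const v _ (fun i hi => by simpa using (List.mem_filter.mp hi).2),
        ← List.count_eq_length_filter, if_gt_eq_max]
  -- B: the dict is counter lista1; its items are the distinct values with their counts
  have hB : taka_sama_alt lista1 =
      (PySem.Set.ofList lista1).foldl
        (fun acc v => max acc (repIter v (lista1.count v) 0)) (-100000) := by
    show ((PySem.Dict.counter lista1).items).foldl
        (fun best kv =>
          let s := (PySem.List.pyRange 0 kv.2 1).foldl (fun s _ => s * 10 + kv.1) 0
          if s > best then s else best) (-100000) = _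
    rw [PySem.Dict.items_counter, List.foldl_map]
    apply PySem.List.foldl_congr_mem
    intro acc v _
    simp only [PySem.List.pyRange_zero_natCast, foldl_ignore_digits, List.length_map,
      List.length_range, if_gt_eq_max]
  rw [hA, hB]
  exact foldl_max_proj_eq _ _ _ _ (fun x => by simp [PySem.Set.mem_ofList])
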